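-- pv_equiv track=rewrite | github.com/btrobot/pi2-web | pipeline/speech_mt_chunking.py | _bucket_en_atomic_units
-- ===== SOURCE A (Python) =====
-- EN_FALLBACK_BUCKET_TOKENS = 12
--
-- def _bucket_en_atomic_units(text: str) -> tuple[str, ...]:
--     tokens = tuple(token for token in text.split(" ") if token)
--     if not tokens:
--         return ()
--     return tuple(
--         " ".join(tokens[index:index + EN_FALLBACK_BUCKET_TOKENS])
--         for index in range(0, len(tokens), EN_FALLBACK_BUCKET_TOKENS)
--     )
-- ===== SOURCE B (Python) =====
-- EN_FALLBACK_BUCKET_TOKENS = 12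
--
-- def _bucket_en_atomic_units(text: str) -> tuple[str, ...]:
--     # Single pass: accumulate tokens into a buffer, flush every 12 tokens.
--     buckets = []
--     buf = []
--     for token in text.split(" "):
--         if not token:
--             continue
--         buf.append(token)
--         if len(buf) == EN_FALLBACK_BUCKET_TOKENS:
--             buckets.append(" ".join(buf))
--             buf = []
--     if buf:
--         buckets.append(" ".join(buf))
--     return tuple(buckets)
-- ===== Notes on version B (the rewrite author's own statement) =====
-- stated objective: alternative
-- what changed: Replaces the filter-then-range/slice chunking (materialise all tokens, then slice tokens[i:i+12] for each range index) by a single pass over the raw split pieces that skips empties and flushes an accumulating buffer every 12 tokens, with a final partial-bucket flush.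
import Mathlib
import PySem

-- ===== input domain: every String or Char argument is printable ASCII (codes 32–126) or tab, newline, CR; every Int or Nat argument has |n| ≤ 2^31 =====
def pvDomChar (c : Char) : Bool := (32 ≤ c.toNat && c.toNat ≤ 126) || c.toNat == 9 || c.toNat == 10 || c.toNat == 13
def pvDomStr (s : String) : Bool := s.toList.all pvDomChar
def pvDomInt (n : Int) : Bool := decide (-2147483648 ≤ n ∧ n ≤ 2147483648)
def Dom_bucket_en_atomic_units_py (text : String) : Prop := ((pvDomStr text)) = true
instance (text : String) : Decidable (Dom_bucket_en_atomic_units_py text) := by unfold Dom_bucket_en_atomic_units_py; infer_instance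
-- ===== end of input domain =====

-- B groups the split tokens into buckets of 12 in one accumulating pass instead of A's
-- range/slice chunking; same cost, different decomposition (objective: alternative).

-- ===== PORT A =====
def bucket_en_atomic_units_py (text : String) : List String :=
  let tokens := ((PySem.Str.split? text " ").getD []).filter (fun t => t ≠ "")
  if tokens = [] then []
  else (PySem.List.pyRange 0 (tokens.length : Int) 12).map
    (fun index => PySem.Str.join " " (PySem.List.slice tokens (some index) (some (index + 12))))

-- ===== PORT B =====
-- the for-loop of Source B: state (buckets, buf)
def pvBucketsLoop : List String → List String → List String → List String × List String
  | [], acc, buf => (acc, buf)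
  | t :: ts, acc, buf =>
    if t = "" then pvBucketsLoop ts acc buf
    else
      let buf' := buf ++ [t]
      if buf'.length = 12 then pvBucketsLoop ts (acc ++ [PySem.Str.join " " buf']) []
      else pvBucketsLoop ts acc buf'

def bucket_en_atomic_units_py_alt (text : String) : List String :=
  let p := pvBucketsLoop ((PySem.Str.split? text " ").getD []) [] []
  if p.2 = [] then p.1 else p.1 ++ [PySem.Str.join " " p.2]

-- ===== PRECONDITION & SPEC =====
def Spec_bucket_en_atomic_units_py (text : String) (out : List String) : Prop := out = bucket_en_atomic_units_py_alt text
instance (text : String) (out : List String) : Decidable (Spec_bucket_en_atomic_units_py text out) := by unfold Spec_bucket_en_atomic_units_py; infer_instance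

-- ===== CLAIM (what is proved, stated in full; the proofs are below) =====
def Claim_equal_bucket_en_atomic_units_py : Prop := ∀ (text : String), Dom_bucket_en_atomic_units_py text → Spec_bucket_en_atomic_units_py text (bucket_en_atomic_units_py text)

-- ===== LEMMAS AND PROOFS =====

-- common specification: chunk a token list into joined buckets of 12
def pvChunksJoin : List String → List String
  | [] => []
  | t :: ts => PySem.Str.join " " ((t :: ts).take 12) :: pvChunksJoin ((t :: ts).drop 12)
termination_by ts => ts.length
decreasing_by simp

lemma chunks_nil : pvChunksJoin [] = [] := by rw [pvChunksJoin.eq_1]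

lemma chunks_cons (t : String) (ts : List String) :
    pvChunksJoin (t :: ts)
      = PySem.Str.join " " ((t :: ts).take 12) :: pvChunksJoin ((t :: ts).drop 12) := by
  rw [pvChunksJoin.eq_2]

lemma pyRange_pos_nil (a b s : Int) (hs : 0 < s) (h : b ≤ a) :
    PySem.List.pyRange a b s = [] := by
  rw [PySem.List.pyRange_of_pos a b hs]
  simp [show ¬ a < b by omega]

lemma pyRange_pos_cons (a b s : Int) (hs : 0 < s) (h : a < b) :
    PySem.List.pyRange a b s = a :: PySem.List.pyRange (a + s) b s := by
  rw [PySem.List.pyRange_of_pos a b hs, PySem.List.pyRange_of_pos (a + s) b hs]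
  have hcount : ((b - a + s - 1) / s).toNat
      = (if a + s < b then ((b - (a + s) + s - 1) / s).toNat else 0) + 1 := by
    have h1 : (b - a + s - 1) / s = (b - a - 1) / s + 1 := by
      have he : b - a + s - 1 = (b - a - 1) + 1 * s := by ring
      rw [he, Int.add_mul_ediv_right _ _ (by omega : s ≠ 0)]
    by_cases hb : a + s < b
    · simp only [hb, if_true]
      have he : b - (a + s) + s - 1 = b - a - 1 := by ring
      rw [he, h1]
      have h0 : 0 ≤ (b - a - 1) / s := Int.ediv_nonneg (by omega) (by omega)
      omega
    · simp only [hb, if_false]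
      have hz : (b - a - 1) / s = 0 := Int.ediv_eq_zero_of_lt (by omega) (by omega)
      rw [h1, hz]
      omega
  rw [if_pos h, hcount, List.range_succ_eq_map]
  simp only [List.map_cons, List.map_map, Nat.cast_zero, mul_zero, add_zero]
  refine congrArg₂ _ rfl ?_
  apply List.map_congr_left
  intro k _
  simp only [Function.comp_apply]
  push_cast
  ring

-- A's range/slice map equals the common chunking, generalized over the start index
lemma mapSlices (tokens : List String) :
    ∀ fuel a, tokens.length ≤ a + fuel →
    (PySem.List.pyRange (a : Int) (tokens.length : Int) 12).map
      (fun index => PySem.Str.join " " (PySem.List.slice tokens (some index) (some (index + 12))))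
      = pvChunksJoin (tokens.drop a) := by
  intro fuel
  induction fuel with
  | zero =>
    intro a ha
    rw [pyRange_pos_nil _ _ _ (by norm_num) (by exact_mod_cast (by omega : tokens.length ≤ a))]
    rw [List.drop_of_length_le (by omega), List.map_nil, chunks_nil]
  | succ n ih =>
    intro a ha
    by_cases hlt : a < tokens.length
    · rw [pyRange_pos_cons _ _ _ (by norm_num) (by exact_mod_cast hlt)]
      simp only [List.map_cons]
      have hslice : PySem.List.slice tokens (some (a : Int)) (some ((a : Int) + 12))
          = (tokens.drop a).take 12 := by
        have hh := PySem.List.slice_natCast_add (xs := tokens) (j := a) (n := 12)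
        simpa using hh
      have hrec : ((a : Int) + 12) = ((a + 12 : Nat) : Int) := by push_cast; ring
      rw [hslice, hrec, ih (a + 12) (by omega)]
      have hne : tokens.drop a ≠ [] := by
        rw [ne_eq, List.drop_eq_nil_iff]; omega
      obtain ⟨t, ts, hts⟩ := List.exists_cons_of_ne_nil hne
      rw [hts, chunks_cons]
      have hdrop : tokens.drop (a + 12) = (t :: ts).drop 12 := by
        rw [← hts, ← List.drop_drop]
      rw [hdrop]
    · rw [pyRange_pos_nil _ _ _ (by norm_num) (by exact_mod_cast (by omega : tokens.length ≤ a))]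
      rw [List.drop_of_length_le (by omega), List.map_nil, chunks_nil]

-- B's loop skips empty tokens: it equals the loop on the filtered list
lemma loop_filter : ∀ ts acc buf,
    pvBucketsLoop ts acc buf = pvBucketsLoop (ts.filter (fun t => t ≠ "")) acc buf := by
  intro ts
  induction ts with
  | nil => intro acc buf; rfl
  | cons t ts ih =>
    intro acc buf
    by_cases h : t = ""
    · simp [pvBucketsLoop, h, ih]
    · simp only [pvBucketsLoop, if_neg h, List.filter_cons,
        show decide (t ≠ "") = true by simp [h], if_true]
      split_ifs with h12
      · exact ih _ _
      · exact ih _ _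

-- B's loop + final flush equals the common chunking of buffer ++ remaining tokens
lemma loop_chunks : ∀ ts acc buf, (∀ t ∈ ts, t ≠ "") → buf.length < 12 →
    (if (pvBucketsLoop ts acc buf).2 = [] then (pvBucketsLoop ts acc buf).1
     else (pvBucketsLoop ts acc buf).1 ++ [PySem.Str.join " " (pvBucketsLoop ts acc buf).2])
    = acc ++ pvChunksJoin (buf ++ ts) := by
  intro ts
  induction ts with
  | nil =>
    intro acc buf _ hlen
    cases hbuf : buf with
    | nil => simp [pvBucketsLoop, chunks_nil]
    | cons b bs =>
      simp only [pvBucketsLoop, List.append_nil]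
      rw [chunks_cons]
      rw [List.take_of_length_le (by subst hbuf; omega),
          List.drop_of_length_le (by subst hbuf; omega), chunks_nil]
      simp
  | cons t ts ih =>
    intro acc buf hne hlen
    have ht : t ≠ "" := hne t (List.mem_cons_self ..)
    simp only [pvBucketsLoop, if_neg ht]
    by_cases h12 : (buf ++ [t]).length = 12
    · rw [if_pos h12]
      rw [ih _ [] (fun x hx => hne x (List.mem_cons_of_mem _ hx)) (by norm_num)]
      have hsplit : buf ++ t :: ts = (buf ++ [t]) ++ ts := by simp
      rw [hsplit]
      have hbe : buf ++ [t] ≠ [] := by simp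
      obtain ⟨c, cs, hcs⟩ := List.exists_cons_of_ne_nil hbe
      rw [hcs]
      have hl : (c :: cs).length = 12 := by rw [← hcs]; exact h12
      rw [show ((c :: cs) ++ ts : List String) = c :: (cs ++ ts) from rfl, chunks_cons]
      rw [show (c :: (cs ++ ts) : List String) = (c :: cs) ++ ts from rfl]
      rw [List.take_append_of_le_length (by omega), List.drop_append_of_le_length (by omega)]
      rw [List.take_of_length_le (by omega), List.drop_of_length_le (by omega)]
      simp
    · rw [if_neg h12]
      have hlen2 : (buf ++ [t]).length < 12 := by
        simp only [List.length_append, List.length_cons, List.length_nil] at *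
        omega
      rw [ih _ _ (fun x hx => hne x (List.mem_cons_of_mem _ hx)) hlen2]
      simp

-- ===== VERDICT (by name: the statement is the Claim_ definition above) =====
theorem bucket_en_atomic_units_py_spec : Claim_equal_bucket_en_atomic_units_py := by
  intro text _
  unfold Spec_bucket_en_atomic_units_py bucket_en_atomic_units_py bucket_en_atomic_units_py_alt
  rw [loop_filter]
  set raw := (PySem.Str.split? text " ").getD [] with hraw
  set tokens := raw.filter (fun t => t ≠ "") with htok
  have hB := loop_chunks tokens [] [] (fun t ht => by
      have := List.of_mem_filter ht; simpa using this) (by norm_num)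
  simp only [List.nil_append] at hB
  rw [hB]
  by_cases h : tokens = []
  · rw [h, chunks_nil]
    simp
  · rw [if_neg h]
    have := mapSlices tokens tokens.length 0 (by omega)
    simpa using this
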